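-- pv_equiv track=rewrite | github.com/GaryTheCaptn/graphes_stage | bus/test.py | generation_matrice_numeros
-- ===== SOURCE A (Python) =====
-- def generation_matrice_numeros(n):
--     """
--     :param n: entier, taille de la matrice
--     :return: une matrice avec les index de chaque case pour le vecteur colonne associe et des -1 pour les autres
--     """
--     M = [[-1] * n for _ in range(n)]
--     index = 0
--     for i in range(0, n):
--         for j in range(i + 1, n):
--             M[i][j] = index
--             index += 1
--     return M
-- ===== SOURCE B (Python) =====
-- def generation_matrice_numeros(n):
--     """
--     :param n: entier, taille de la matrice
--     :return: une matrice avec les index de chaque case pour le vecteur colonne associe et des -1 pour les autres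
--     """
--     return [[-1 if j <= i else i * (n - 1) - i * (i - 1) // 2 + (j - i - 1)
--              for j in range(n)]
--             for i in range(n)]
-- ===== Notes on version B (the rewrite author's own statement) =====
-- stated objective: simpler
-- what changed: Replaced the running cross-cell index counter and in-place mutation of a pre-built -1 matrix by a closed-form expression offset(i)+(j-i-1) with offset(i)=i*(n-1)-i*(i-1)//2, computed cell by cell in a pure comprehension with no accumulator.
import Mathlib
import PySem

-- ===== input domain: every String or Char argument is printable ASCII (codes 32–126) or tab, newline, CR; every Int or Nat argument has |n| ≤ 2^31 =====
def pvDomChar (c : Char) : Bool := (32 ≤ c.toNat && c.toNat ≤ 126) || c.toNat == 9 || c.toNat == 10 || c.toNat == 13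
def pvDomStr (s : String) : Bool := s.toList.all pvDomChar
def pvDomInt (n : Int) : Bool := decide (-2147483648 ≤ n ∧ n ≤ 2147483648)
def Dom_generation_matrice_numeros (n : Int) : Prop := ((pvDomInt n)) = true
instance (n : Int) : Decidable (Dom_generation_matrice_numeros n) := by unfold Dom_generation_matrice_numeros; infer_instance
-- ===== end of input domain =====

-- B replaces A's running index counter and in-place matrix mutation by a closed-form
-- per-cell formula computed in a pure comprehension (objective: simpler).

-- ===== PORT A =====
-- Python's mutable list-of-lists M is modelled as Array (Array Int): M[i][j] = index is the
-- O(1) in-place 'modify row i, set cell j'; the returned matrix is read back as lists at the end.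
def generation_matrice_numeros (n : Int) : List (List Int) :=
  (((PySem.List.pyRange 0 n 1).foldl
      (fun (st : Array (Array Int) × Int) i =>
        (PySem.List.pyRange (i + 1) n 1).foldl
          (fun (st : Array (Array Int) × Int) j =>
            (st.1.modify i.toNat (fun row => row.setIfInBounds j.toNat st.2), st.2 + 1))
          st)
      (((PySem.List.pyRange 0 n 1).map (fun _ => Array.replicate n.toNat (-1 : Int))).toArray,
       0)).1.toList.map Array.toList)

-- ===== PORT B =====
def generation_matrice_numeros_alt (n : Int) : List (List Int) :=
  (PySem.List.pyRange 0 n 1).map (fun i =>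
    (PySem.List.pyRange 0 n 1).map (fun j =>
      if j ≤ i then -1
      else i * (n - 1) - PySem.Int.floordiv (i * (i - 1)) 2 + (j - i - 1)))

-- ===== PRECONDITION & SPEC =====
def Spec_generation_matrice_numeros (n : Int) (out : List (List Int)) : Prop := out = generation_matrice_numeros_alt n
instance (n : Int) (out : List (List Int)) : Decidable (Spec_generation_matrice_numeros n out) := by unfold Spec_generation_matrice_numeros; infer_instance

-- ===== CLAIM (what is proved, stated in full; the proofs are below) =====
def Claim_equal_generation_matrice_numeros : Prop := ∀ (n : Int), Dom_generation_matrice_numeros n → Spec_generation_matrice_numeros n (generation_matrice_numeros n)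

-- ===== LEMMAS AND PROOFS =====

-- column-vector offset of row i (what A's counter holds when row i starts)
def pvOff (n i : Int) : Int := i * (n - 1) - PySem.Int.floordiv (i * (i - 1)) 2

lemma pvOff_zero (n : Int) : pvOff n 0 = 0 := by
  unfold pvOff
  rw [PySem.Int.floordiv_eq_ediv_of_pos (by norm_num)]
  norm_num

lemma pvOff_succ (n m : Int) : pvOff n (m + 1) = pvOff n m + (n - m - 1) := by
  unfold pvOff
  rw [PySem.Int.floordiv_eq_ediv_of_pos (by norm_num),
      PySem.Int.floordiv_eq_ediv_of_pos (by norm_num)]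
  obtain ⟨k, hk⟩ := Int.even_mul_succ_self (m - 1)
  have h1 : m * (m - 1) = 2 * k := by linear_combination hk
  have h2 : (m + 1) * (m + 1 - 1) = 2 * (k + m) := by linear_combination hk
  rw [h1, h2, Int.mul_ediv_cancel_left _ (by norm_num), Int.mul_ediv_cancel_left _ (by norm_num)]
  ring

-- A's inner loop: only row i evolves; it factors through a fold on that row,
-- and the counter advances by (n - c).
lemma inner_spec (n i : Int) (hi : 0 ≤ i) :
    ∀ (c : Int), i < c → c ≤ n → ∀ (M : List (List Int)) (idx : Int), i < (M.length : Int) →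
    (PySem.List.pyRange c n 1).foldl
      (fun (st : List (List Int) × Int) j =>
        (PySem.List.pySetD st.1 i (PySem.List.pySetD (PySem.List.pyGetD st.1 i []) j st.2),
         st.2 + 1)) (M, idx)
    = (PySem.List.pySetD M i
        ((PySem.List.pyRange c n 1).foldl
          (fun (p : List Int × Int) j => (PySem.List.pySetD p.1 j p.2, p.2 + 1))
          (PySem.List.pyGetD M i [], idx)).1,
       idx + (n - c)) := by
  intro c
  induction hk : (n - c).toNat generalizing c with
  | zero =>
    intro hic hcn M idx hM
    rw [PySem.List.pyRange_one_eq_nil (by omega)]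
    simp only [List.foldl_nil]
    have hnc : n - c = 0 := by omega
    rw [PySem.List.pySetD_of_nonneg _ _ hi, PySem.List.pyGetD_of_nonneg _ _ hi, hnc]
    have hi' : i.toNat < M.length := by omega
    rw [List.getD_eq_getElem?_getD, List.getElem?_eq_getElem hi']
    simp [List.set_getElem_self]
  | succ k ih =>
    intro hic hcn M idx hM
    have hclt : c < n := by omega
    rw [PySem.List.pyRange_one_cons hclt]
    simp only [List.foldl_cons]
    set ρ1 : List Int := PySem.List.pySetD (PySem.List.pyGetD M i []) c idx with hρ1
    have hM1 : i < (((PySem.List.pySetD M i ρ1).length : Nat) : Int) := by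
      rw [PySem.List.pySetD_of_nonneg _ _ hi, List.length_set]; exact hM
    rw [ih (c + 1) (by omega) (by omega) (by omega) (PySem.List.pySetD M i ρ1) (idx + 1) hM1]
    have hi' : i.toNat < M.length := by omega
    have hgd : PySem.List.pyGetD (PySem.List.pySetD M i ρ1) i ([] : List Int) = ρ1 := by
      rw [PySem.List.pySetD_of_nonneg _ _ hi, PySem.List.pyGetD_of_nonneg _ _ hi,
          List.getD_eq_getElem?_getD]
      simp [hi']
    rw [hgd]
    have hset : ∀ (r r' : List Int),
        PySem.List.pySetD (PySem.List.pySetD M i r) i r' = PySem.List.pySetD M i r' := by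
      intro r r'
      rw [PySem.List.pySetD_of_nonneg _ _ hi, PySem.List.pySetD_of_nonneg _ _ hi,
          PySem.List.pySetD_of_nonneg _ _ hi, List.set_set]
    rw [hset]
    simp only [Prod.mk.injEq]
    exact ⟨trivial, by ring⟩

-- the row-level fold fills positions ≥ c with consecutive values starting at idx
lemma rowFold_spec (n : Int) :
    ∀ (c : Int) (ρ : List Int) (idx : Int), 0 ≤ c → c ≤ n → (ρ.length : Int) = n →
    ((PySem.List.pyRange c n 1).foldl
      (fun (p : List Int × Int) j => (PySem.List.pySetD p.1 j p.2, p.2 + 1)) (ρ, idx)).1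
    = ρ.take c.toNat ++ (PySem.List.pyRange c n 1).map (fun j => idx + (j - c)) := by
  intro c
  induction hk : (n - c).toNat generalizing c with
  | zero =>
    intro ρ idx h0 hcn hρ
    rw [PySem.List.pyRange_one_eq_nil (by omega)]
    simp only [List.foldl_nil, List.map_nil, List.append_nil]
    rw [List.take_of_length_le (by omega)]
  | succ k ih =>
    intro ρ idx h0 hcn hρ
    have hclt : c < n := by omega
    rw [PySem.List.pyRange_one_cons hclt]
    simp only [List.foldl_cons]
    rw [PySem.List.pySetD_of_nonneg _ _ h0,
        ih (c + 1) (by omega) (ρ.set c.toNat idx) (idx + 1) (by omega) (by omega) (by simpa using hρ)]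
    have hlt : c.toNat < ρ.length := by omega
    have hc1 : (c + 1).toNat = c.toNat + 1 := by omega
    have haux : ∀ (xs : List Int) (y : Int) (zs : List Int),
        (xs ++ y :: zs).take (xs.length + 1) = xs ++ [y] := by
      intro xs y zs
      induction xs with
      | nil => simp
      | cons a t iht => simp [iht]
    have htake : (ρ.set c.toNat idx).take (c.toNat + 1) = ρ.take c.toNat ++ [idx] := by
      rw [List.set_eq_take_append_cons_drop, if_pos hlt]
      have h := haux (ρ.take c.toNat) idx (ρ.drop (c.toNat + 1))
      rwa [List.length_take, Nat.min_eq_left hlt.le] at h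
    have hmap : (PySem.List.pyRange (c + 1) n 1).map (fun j => idx + 1 + (j - (c + 1)))
        = (PySem.List.pyRange (c + 1) n 1).map (fun j => idx + (j - c)) := by
      apply List.map_congr_left; intro j _; ring
    rw [hc1, htake, hmap, List.append_assoc]
    simp only [List.map_cons, List.singleton_append, sub_self, add_zero]

-- B's row i, and the value A's inner loop actually produces for row i, agree
lemma row_eq (n i : Int) (h0 : 0 ≤ i) (hin : i < n) :
    List.replicate (i + 1).toNat (-1 : Int)
      ++ (PySem.List.pyRange (i + 1) n 1).map (fun j => pvOff n i + (j - (i + 1)))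
    = (PySem.List.pyRange 0 n 1).map (fun j =>
        if j ≤ i then -1
        else i * (n - 1) - PySem.Int.floordiv (i * (i - 1)) 2 + (j - i - 1)) := by
  rw [PySem.List.pyRange_one_append 0 (i + 1) n (by omega) (by omega), List.map_append]
  congr 1
  · symm
    rw [List.eq_replicate_iff]
    refine ⟨by rw [List.length_map, PySem.List.length_pyRange_one]; omega, ?_⟩
    intro b hb
    simp only [List.mem_map] at hb
    obtain ⟨j, hj, hjb⟩ := hb
    rw [PySem.List.mem_pyRange_one] at hj
    rw [if_pos (by omega : j ≤ i)] at hjb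
    omega
  · apply List.map_congr_left
    intro j hj
    rw [PySem.List.mem_pyRange_one] at hj
    rw [if_neg (by omega : ¬ j ≤ i)]
    unfold pvOff
    ring

-- A's outer loop invariant: rows already done stay, remaining rows get filled
lemma outer_spec (n : Int) :
    ∀ (m : Int), 0 ≤ m → m ≤ n → ∀ (done : List (List Int)), (done.length : Int) = m →
    ((PySem.List.pyRange m n 1).foldl
      (fun (st : List (List Int) × Int) i =>
        (PySem.List.pyRange (i + 1) n 1).foldl
          (fun (st : List (List Int) × Int) j =>
            (PySem.List.pySetD st.1 i (PySem.List.pySetD (PySem.List.pyGetD st.1 i []) j st.2),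
             st.2 + 1))
          st)
      (done ++ (PySem.List.pyRange m n 1).map (fun _ => PySem.List.pyRepeat [(-1 : Int)] n),
       pvOff n m)).1
    = done ++ (PySem.List.pyRange m n 1).map (fun i =>
        (PySem.List.pyRange 0 n 1).map (fun j =>
          if j ≤ i then -1
          else i * (n - 1) - PySem.Int.floordiv (i * (i - 1)) 2 + (j - i - 1))) := by
  intro m
  induction hk : (n - m).toNat generalizing m with
  | zero =>
    intro h0 hmn done hd
    rw [PySem.List.pyRange_one_eq_nil (by omega)]
    simp
  | succ k ih =>
    intro h0 hmn done hd
    have hmlt : m < n := by omega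
    rw [PySem.List.pyRange_one_cons hmlt]
    simp only [List.foldl_cons, List.map_cons]
    set row0 : List Int := PySem.List.pyRepeat [(-1 : Int)] n with hrow0
    set rest : List (List Int) :=
      (PySem.List.pyRange (m + 1) n 1).map (fun _ => row0) with hrest
    have hMlen : (m : Int) < (((done ++ row0 :: rest).length : Nat) : Int) := by
      simp; omega
    rw [inner_spec n m h0 (m + 1) (by omega) (by omega) (done ++ row0 :: rest) (pvOff n m) hMlen]
    have hm' : m.toNat = done.length := by omega
    have hget : PySem.List.pyGetD (done ++ row0 :: rest) m ([] : List Int) = row0 := by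
      rw [PySem.List.pyGetD_of_nonneg _ _ h0, List.getD_eq_getElem?_getD, hm',
          List.getElem?_append_right (le_refl done.length)]
      simp
    rw [hget]
    have hrowlen : (row0.length : Int) = n := by
      rw [hrow0, PySem.List.pyRepeat_singleton, List.length_replicate]; omega
    rw [rowFold_spec n (m + 1) row0 (pvOff n m) (by omega) (by omega) hrowlen]
    have htake : row0.take (m + 1).toNat = List.replicate (m + 1).toNat (-1 : Int) := by
      rw [hrow0, PySem.List.pyRepeat_singleton, List.take_replicate, Nat.min_eq_left (by omega)]
    rw [htake, row_eq n m h0 hmlt]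
    set rowF : List Int := (PySem.List.pyRange 0 n 1).map (fun j =>
      if j ≤ m then -1
      else m * (n - 1) - PySem.Int.floordiv (m * (m - 1)) 2 + (j - m - 1)) with hrowF
    have hsetM : PySem.List.pySetD (done ++ row0 :: rest) m rowF = done ++ rowF :: rest := by
      rw [PySem.List.pySetD_of_nonneg _ _ h0, hm',
          List.set_append_right _ _ (le_refl done.length)]
      simp
    rw [hsetM]
    have hidx : pvOff n m + (n - (m + 1)) = pvOff n (m + 1) := by
      rw [pvOff_succ]; ring
    rw [hidx]
    have hih := ih (m + 1) (by omega) (by omega) (by omega) (done ++ [rowF]) (by simp; omega)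
    simpa [hrest, List.append_assoc] using hih

-- one mutation step of A, read back as lists, is the corresponding functional update
lemma arr_step_sim (M : Array (Array Int)) (i j v : Int) (hi : 0 ≤ i) (hj : 0 ≤ j) :
    (M.modify i.toNat (fun row => row.setIfInBounds j.toNat v)).toList.map Array.toList
    = PySem.List.pySetD (M.toList.map Array.toList) i
        (PySem.List.pySetD (PySem.List.pyGetD (M.toList.map Array.toList) i []) j v) := by
  rw [PySem.List.pySetD_of_nonneg _ _ hi, PySem.List.pySetD_of_nonneg _ _ hj,
      PySem.List.pyGetD_of_nonneg _ _ hi]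
  rw [Array.toList_modify, List.modify_eq_set, List.map_set]
  congr 1
  rw [Array.toList_setIfInBounds]
  congr 1
  by_cases h : i.toNat < M.toList.length
  · simp [List.getD_eq_getElem?_getD, List.getElem?_eq_getElem h]
  · rw [List.getElem?_eq_none (by omega), List.getD_eq_getElem?_getD,
        List.getElem?_eq_none (by rw [List.length_map]; omega)]
    simp
    rfl

-- the array-state inner loop simulates the list-state inner loop
lemma inner_sim (i : Int) (hi : 0 ≤ i) :
    ∀ (js : List Int), (∀ j ∈ js, 0 ≤ j) → ∀ (M : Array (Array Int)) (idx : Int),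
    (js.foldl (fun (st : Array (Array Int) × Int) j =>
        (st.1.modify i.toNat (fun row => row.setIfInBounds j.toNat st.2), st.2 + 1))
        (M, idx)).1.toList.map Array.toList
      = (js.foldl (fun (st : List (List Int) × Int) j =>
          (PySem.List.pySetD st.1 i (PySem.List.pySetD (PySem.List.pyGetD st.1 i []) j st.2),
           st.2 + 1)) (M.toList.map Array.toList, idx)).1
    ∧ (js.foldl (fun (st : Array (Array Int) × Int) j =>
        (st.1.modify i.toNat (fun row => row.setIfInBounds j.toNat st.2), st.2 + 1))
        (M, idx)).2
      = (js.foldl (fun (st : List (List Int) × Int) j =>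
          (PySem.List.pySetD st.1 i (PySem.List.pySetD (PySem.List.pyGetD st.1 i []) j st.2),
           st.2 + 1)) (M.toList.map Array.toList, idx)).2 := by
  intro js
  induction js with
  | nil => exact fun _ M idx => ⟨rfl, rfl⟩
  | cons j js ih =>
    intro hjs M idx
    simp only [List.foldl_cons]
    have hstep := arr_step_sim M i j idx hi (hjs j (by simp))
    obtain ⟨h1, h2⟩ := ih (fun j' hj' => hjs j' (by simp [hj']))
      (M.modify i.toNat (fun row => row.setIfInBounds j.toNat idx)) (idx + 1)
    rw [hstep] at h1 h2
    exact ⟨h1, h2⟩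

-- the array-state outer loop simulates the list-state outer loop
lemma outer_sim (n : Int) :
    ∀ (is : List Int), (∀ i ∈ is, 0 ≤ i) → ∀ (M : Array (Array Int)) (idx : Int),
    (is.foldl (fun (st : Array (Array Int) × Int) i =>
        (PySem.List.pyRange (i + 1) n 1).foldl
          (fun (st : Array (Array Int) × Int) j =>
            (st.1.modify i.toNat (fun row => row.setIfInBounds j.toNat st.2), st.2 + 1))
          st) (M, idx)).1.toList.map Array.toList
      = (is.foldl (fun (st : List (List Int) × Int) i =>
          (PySem.List.pyRange (i + 1) n 1).foldl
            (fun (st : List (List Int) × Int) j =>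
              (PySem.List.pySetD st.1 i (PySem.List.pySetD (PySem.List.pyGetD st.1 i []) j st.2),
               st.2 + 1))
            st) (M.toList.map Array.toList, idx)).1
    ∧ (is.foldl (fun (st : Array (Array Int) × Int) i =>
        (PySem.List.pyRange (i + 1) n 1).foldl
          (fun (st : Array (Array Int) × Int) j =>
            (st.1.modify i.toNat (fun row => row.setIfInBounds j.toNat st.2), st.2 + 1))
          st) (M, idx)).2
      = (is.foldl (fun (st : List (List Int) × Int) i =>
          (PySem.List.pyRange (i + 1) n 1).foldl
            (fun (st : List (List Int) × Int) j =>
              (PySem.List.pySetD st.1 i (PySem.List.pySetD (PySem.List.pyGetD st.1 i []) j st.2),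
               st.2 + 1))
            st) (M.toList.map Array.toList, idx)).2 := by
  intro is
  induction is with
  | nil => exact fun _ M idx => ⟨rfl, rfl⟩
  | cons i is ih =>
    intro his M idx
    simp only [List.foldl_cons]
    have hi : 0 ≤ i := his i (by simp)
    have hjpos : ∀ j ∈ PySem.List.pyRange (i + 1) n 1, 0 ≤ j := by
      intro j hj
      rw [PySem.List.mem_pyRange_one] at hj
      omega
    obtain ⟨h1, h2⟩ := inner_sim i hi (PySem.List.pyRange (i + 1) n 1) hjpos M idx
    set p := (PySem.List.pyRange (i + 1) n 1).foldl (fun (st : Array (Array Int) × Int) j =>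
        (st.1.modify i.toNat (fun row => row.setIfInBounds j.toNat st.2), st.2 + 1)) (M, idx) with hp
    set q := (PySem.List.pyRange (i + 1) n 1).foldl (fun (st : List (List Int) × Int) j =>
          (PySem.List.pySetD st.1 i (PySem.List.pySetD (PySem.List.pyGetD st.1 i []) j st.2),
           st.2 + 1)) (M.toList.map Array.toList, idx) with hq
    obtain ⟨g1, g2⟩ := ih (fun i' hi' => his i' (by simp [hi'])) p.1 p.2
    have hpair : (p.1.toList.map Array.toList, p.2) = q := by rw [h1, h2]
    rw [hpair] at g1 g2
    exact ⟨g1, g2⟩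

-- ===== VERDICT (by name: the statement is the Claim_ definition above) =====
theorem generation_matrice_numeros_spec : Claim_equal_generation_matrice_numeros := by
  unfold Claim_equal_generation_matrice_numeros
  intro n _
  unfold Spec_generation_matrice_numeros generation_matrice_numeros generation_matrice_numeros_alt
  have hipos : ∀ i ∈ PySem.List.pyRange 0 n 1, 0 ≤ i := by
    intro i hi
    rw [PySem.List.mem_pyRange_one] at hi
    omega
  obtain ⟨h1, _⟩ := outer_sim n (PySem.List.pyRange 0 n 1) hipos
    (((PySem.List.pyRange 0 n 1).map (fun _ => Array.replicate n.toNat (-1 : Int))).toArray) 0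
  rw [h1]
  have hM0 : (((PySem.List.pyRange 0 n 1).map
        (fun _ => Array.replicate n.toNat (-1 : Int))).toArray).toList.map Array.toList
      = (PySem.List.pyRange 0 n 1).map (fun _ => PySem.List.pyRepeat [(-1 : Int)] n) := by
    simp [PySem.List.pyRepeat_singleton]
  rw [hM0]
  by_cases hn : 0 ≤ n
  · have h := outer_spec n 0 (le_refl 0) hn [] (by simp)
    rw [pvOff_zero] at h
    simpa using h
  · rw [PySem.List.pyRange_one_eq_nil (by omega)]
    simp
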